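-- pv_equiv track=rewrite | github.com/kisant/PythonHomework | Session_2/Task4.py | split_by_index
-- ===== SOURCE A (Python) =====
-- def split_by_index(string_f, indexes_f):
--     output = []
--     my_index = 0
--
--     for item in indexes_f:
--         if item < len(string_f):
--             output.append(string_f[my_index:item])
--             my_index = item
--
--     return output
-- ===== SOURCE B (Python) =====
-- def split_by_index(string_f, indexes_f):
--     n = len(string_f)
--     out = []
--     nxt = None  # end of the segment currently being closed, scanning right-to-left
--     for i in reversed(indexes_f):
--         if i < n:
--             if nxt is not None:
--                 out.append(string_f[i:nxt])
--             nxt = i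
--     if nxt is not None:
--         out.append(string_f[0:nxt])
--     out.reverse()
--     return out
-- ===== Notes on version B (the rewrite author's own statement) =====
-- stated objective: alternative
-- what changed: Traverses the index list right-to-left, maintaining the end of the segment being closed (the next kept index) instead of A's running start position, emitting the slices back-to-front and reversing the output at the end.
import Mathlib
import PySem

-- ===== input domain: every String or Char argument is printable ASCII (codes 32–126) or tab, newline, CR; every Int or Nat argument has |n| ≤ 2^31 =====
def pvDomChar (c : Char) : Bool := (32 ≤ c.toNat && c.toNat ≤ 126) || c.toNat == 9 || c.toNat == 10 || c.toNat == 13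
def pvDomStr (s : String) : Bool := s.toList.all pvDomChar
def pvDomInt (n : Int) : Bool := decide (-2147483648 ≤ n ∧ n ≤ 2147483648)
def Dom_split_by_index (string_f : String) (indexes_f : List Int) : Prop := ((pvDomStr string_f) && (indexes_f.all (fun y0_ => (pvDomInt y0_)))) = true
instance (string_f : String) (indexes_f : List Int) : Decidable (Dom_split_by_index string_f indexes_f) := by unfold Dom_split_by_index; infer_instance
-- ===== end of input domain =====

-- B scans the indexes right-to-left, tracking each segment's END (the next kept index) instead of
-- A's running start, and builds the output back-to-front; same cost, different traversal.
-- ===== PORT A =====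
def split_by_index (string_f : String) (indexes_f : List Int) : List String :=
  (indexes_f.foldl
    (fun (st : List String × Int) item =>
      if item < (PySem.Str.len string_f : Int) then
        (st.1 ++ [PySem.Str.slice string_f (some st.2) (some item)], item)
      else st)
    ([], 0)).1

-- ===== PORT B =====
def split_by_index_alt (string_f : String) (indexes_f : List Int) : List String :=
  let n : Int := PySem.Str.len string_f
  let st := indexes_f.reverse.foldl
    (fun (st : List String × Option Int) i =>
      if i < n then
        match st.2 with
        | some nx => (st.1 ++ [PySem.Str.slice string_f (some i) (some nx)], some i)
        | none => (st.1, some i)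
      else st)
    ([], none)
  let out := match st.2 with
    | some nx => st.1 ++ [PySem.Str.slice string_f (some 0) (some nx)]
    | none => st.1
  out.reverse

-- ===== PRECONDITION & SPEC =====
def Spec_split_by_index (string_f : String) (indexes_f : List Int) (out : List String) : Prop := out = split_by_index_alt string_f indexes_f
instance (string_f : String) (indexes_f : List Int) (out : List String) : Decidable (Spec_split_by_index string_f indexes_f out) := by unfold Spec_split_by_index; infer_instance

-- ===== CLAIM (what is proved, stated in full; the proofs are below) =====
def Claim_equal_split_by_index : Prop := ∀ (string_f : String) (indexes_f : List Int), Dom_split_by_index string_f indexes_f → Spec_split_by_index string_f indexes_f (split_by_index string_f indexes_f)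

-- ===== LEMMAS AND PROOFS =====

-- A's loop produces the pairwise slices of consecutive kept indexes, prefixed by the running start.
lemma split_loop_eq (s : String) (idx : List Int) (acc : List String) (cur : Int) :
    (idx.foldl
      (fun (st : List String × Int) item =>
        if item < (PySem.Str.len s : Int) then
          (st.1 ++ [PySem.Str.slice s (some st.2) (some item)], item)
        else st)
      (acc, cur)).1
    = acc ++ (((cur :: idx.filter (fun i => i < (PySem.Str.len s : Int))).zip
                (idx.filter (fun i => i < (PySem.Str.len s : Int)))).map
        (fun p => PySem.Str.slice s (some p.1) (some p.2))) := by
  induction idx generalizing acc cur with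
  | nil => simp
  | cons a t ih =>
    by_cases h : a < (PySem.Str.len s : Int)
    · simp only [List.foldl_cons, List.filter_cons, h, decide_true]
      rw [ih]
      simp
    · simp only [List.foldl_cons, List.filter_cons, h, decide_false]
      exact ih acc cur

-- a fold with an 'if p' guard is the unguarded fold over the filtered list
lemma foldl_guard {α β : Type} (p : β → Prop) [DecidablePred p] (f : α → β → α) (l : List β) (a : α) :
    l.foldl (fun a b => if p b then f a b else a) a = (l.filter (fun b => decide (p b))).foldl f a := by
  induction l generalizing a with
  | nil => rfl
  | cons x t ih =>
    by_cases h : p x <;> simp [h, ih]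

-- B's reverse fold over the kept list, characterised: reversed pairwise slices plus the head boundary.
lemma rev_fold_eq (s : String) (l : List Int) :
    l.reverse.foldl
      (fun (st : List String × Option Int) i =>
        match st.2 with
        | some nx => (st.1 ++ [PySem.Str.slice s (some i) (some nx)], some i)
        | none => (st.1, some i))
      ([], none)
    = (((l.zip l.tail).map (fun p => PySem.Str.slice s (some p.1) (some p.2))).reverse,
        l.head?) := by
  induction l with
  | nil => rfl
  | cons a t ih =>
    rw [List.reverse_cons, List.foldl_append, ih]
    cases t <;> simp

theorem split_by_index_spec : Claim_equal_split_by_index := by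
  intro s idx _
  unfold Spec_split_by_index split_by_index split_by_index_alt
  rw [split_loop_eq]
  have hg := foldl_guard (fun i => i < (PySem.Str.len s : Int))
      (fun (st : List String × Option Int) i =>
        match st.2 with
        | some nx => (st.1 ++ [PySem.Str.slice s (some i) (some nx)], some i)
        | none => (st.1, some i))
      idx.reverse ([], none)
  dsimp only
  rw [hg, List.filter_reverse, rev_fold_eq]
  cases idx.filter (fun i => i < (PySem.Str.len s : Int)) <;> simp
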